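-- pv_equiv track=rewrite | github.com/rsevial/Cipher | Assign 2.3-Vigenère Cipher.py | pad_key
-- ===== SOURCE A (Python) =====
-- def pad_key(message, key):
-- # Variable to store padded key
--     padded_key = ""
-- # Check the chr if alpha
--     i = 0
--     for chr in message:
--         if chr.isalpha():
--             padded_key += key[i % len(key)]
--             i += 1
--         # Else, ignore and append as empty
--         else:
--             padded_key += ' '
--     # Return padded_key
--     return padded_key
-- ===== SOURCE B (Python) =====
-- def pad_key(message, key):
--     # Index table first: positions of alphabetic chars, then a second fill pass.
--     positions = [idx for idx, c in enumerate(message) if c.isalpha()]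
--     out = [' '] * len(message)
--     for n, pos in enumerate(positions):
--         out[pos] = key[n % len(key)]
--     return ''.join(out)
-- ===== Notes on version B (the rewrite author's own statement) =====
-- stated objective: alternative
-- what changed: Replaces A's single fused scan with an inline letter counter by a two-pass index-table construction: first collect the positions of alphabetic characters, then fill a preallocated blank list by indexing into that table, joining at the end.
import Mathlib
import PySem

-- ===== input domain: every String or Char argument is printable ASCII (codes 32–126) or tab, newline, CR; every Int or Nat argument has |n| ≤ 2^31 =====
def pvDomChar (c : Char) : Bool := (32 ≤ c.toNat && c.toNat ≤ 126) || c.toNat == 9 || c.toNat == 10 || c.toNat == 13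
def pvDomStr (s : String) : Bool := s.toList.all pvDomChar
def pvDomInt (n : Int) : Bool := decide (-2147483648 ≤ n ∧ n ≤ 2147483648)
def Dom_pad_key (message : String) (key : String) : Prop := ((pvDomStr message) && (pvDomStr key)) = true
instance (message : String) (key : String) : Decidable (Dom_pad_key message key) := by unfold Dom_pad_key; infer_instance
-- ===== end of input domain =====

-- B rebuilds the key padding in two passes (index table of alphabetic positions, then a fill pass)
-- instead of A's single fused scan; objective: alternative decomposition, same result.

-- ===== PORT A =====
-- Literal port of A: one fold over the message with state (padded_key, i);
-- key[i % len(key)] is pyGetD (in range under Pre_: key nonempty whenever a letter occurs).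
def pad_key (message : String) (key : String) : String :=
  let ks := key.toList
  let st := message.toList.foldl
    (fun (st : List Char × Int) c =>
      if PySem.Chars.isalpha c then
        (st.1 ++ [PySem.List.pyGetD ks (PySem.Int.mod st.2 (ks.length : Int)) ' '], st.2 + 1)
      else
        (st.1 ++ [' '], st.2)) ([], (0 : Int))
  String.ofList st.1

-- ===== PORT B =====
-- Literal port of B: positions = [idx for idx,c in enumerate(message) if c.isalpha()];
-- out = [' ']*len(message); for n,pos in enumerate(positions): out[pos] = key[n % len(key)];
-- ''.join(out) on a list of single chars is String.ofList.
def pad_key_alt (message : String) (key : String) : String :=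
  let ms := message.toList
  let ks := key.toList
  let positions := ((PySem.List.enumerate ms 0).filter (fun p => PySem.Chars.isalpha p.2)).map (fun p => p.1)
  let out0 := ms.map (fun _ => ' ')
  let out := (PySem.List.enumerate positions 0).foldl
    (fun o np => PySem.List.pySetD o np.2 (PySem.List.pyGetD ks (PySem.Int.mod np.1 (ks.length : Int)) ' ')) out0
  String.ofList out

-- ===== PRECONDITION & SPEC =====
-- A raises ZeroDivisionError (key[i % 0]) iff key is empty and message contains a letter; B raises there too.
def Pre_pad_key (message : String) (key : String) : Prop :=
  key ≠ "" ∨ message.toList.all (fun c => !(PySem.Chars.isalpha c)) = true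
instance (message : String) (key : String) : Decidable (Pre_pad_key message key) := by
  unfold Pre_pad_key; infer_instance
def pvWitness_pad_key : String × String := ("Hi there!", "key")

def Spec_pad_key (message : String) (key : String) (out : String) : Prop := out = pad_key_alt message key
instance (message : String) (key : String) (out : String) : Decidable (Spec_pad_key message key out) := by unfold Spec_pad_key; infer_instance

-- ===== CLAIM (what is proved, stated in full; the proofs are below) =====
def Claim_equal_pad_key : Prop := ∀ (message : String) (key : String), Dom_pad_key message key → Pre_pad_key message key → Spec_pad_key message key (pad_key message key)

-- ===== LEMMAS AND PROOFS =====

-- Reference result: the padded key, written structurally (n = letters seen so far).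
def pvRef (ks : List Char) : List Char → Nat → List Char
  | [], _ => []
  | c :: cs, n =>
    if PySem.Chars.isalpha c then
      PySem.List.pyGetD ks (PySem.Int.mod (n : Int) (ks.length : Int)) ' ' :: pvRef ks cs (n + 1)
    else
      ' ' :: pvRef ks cs n

-- Reference positions of alphabetic chars, starting at index j.
def pvPos : List Char → Int → List Int
  | [], _ => []
  | c :: cs, j => if PySem.Chars.isalpha c then j :: pvPos cs (j + 1) else pvPos cs (j + 1)

theorem pvA_loop (ks : List Char) (cs : List Char) (acc : List Char) (n : Nat) :
    cs.foldl
      (fun (st : List Char × Int) c =>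
        if PySem.Chars.isalpha c then
          (st.1 ++ [PySem.List.pyGetD ks (PySem.Int.mod st.2 (ks.length : Int)) ' '], st.2 + 1)
        else
          (st.1 ++ [' '], st.2)) (acc, (n : Int))
    = (acc ++ pvRef ks cs n,
       ((n + cs.countP (fun c => PySem.Chars.isalpha c) : Nat) : Int)) := by
  induction cs generalizing acc n with
  | nil => simp [pvRef]
  | cons c cs ih =>
    by_cases h : PySem.Chars.isalpha c = true
    · have : ((n : Int) + 1) = ((n + 1 : Nat) : Int) := by push_cast; ring
      simp only [List.foldl_cons, h, if_pos, this]
      rw [ih]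
      simp [pvRef, h]
      omega
    · simp only [List.foldl_cons, h, if_neg, Bool.false_eq_true, not_false_iff]
      rw [ih]
      simp [pvRef, h]

theorem pvB_pos (cs : List Char) (j : Int) :
    ((PySem.List.enumerate cs j).filter (fun p => PySem.Chars.isalpha p.2)).map (fun p => p.1)
      = pvPos cs j := by
  induction cs generalizing j with
  | nil => simp [PySem.List.enumerate_nil, pvPos]
  | cons c cs ih =>
    rw [PySem.List.enumerate_cons]
    by_cases h : PySem.Chars.isalpha c = true
    · simp [h, pvPos, ih]
    · simp [h, pvPos, ih]

theorem pvSet_mid (pre suf : List Char) (x v : Char) :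
    PySem.List.pySetD (pre ++ x :: suf) ((pre.length : Nat) : Int) v = pre ++ v :: suf := by
  rw [PySem.List.pySetD_natCast]
  induction pre with
  | nil => simp
  | cons p pre ih => simp [List.set_cons_succ, ih]

theorem pvB_fill (ks : List Char) (cs : List Char) (n : Nat) (pre : List Char) :
    (PySem.List.enumerate (pvPos cs (pre.length : Int)) (n : Int)).foldl
      (fun o np => PySem.List.pySetD o np.2
        (PySem.List.pyGetD ks (PySem.Int.mod np.1 (ks.length : Int)) ' '))
      (pre ++ cs.map (fun _ => ' '))
    = pre ++ pvRef ks cs n := by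
  induction cs generalizing n pre with
  | nil => simp [pvPos, pvRef, PySem.List.enumerate_nil]
  | cons c cs ih =>
    by_cases h : PySem.Chars.isalpha c = true
    · have hmap : (c :: cs).map (fun _ => ' ') = ' ' :: cs.map (fun _ => ' ') := rfl
      simp only [pvPos, h, if_pos, PySem.List.enumerate_cons, List.foldl_cons, hmap]
      rw [pvSet_mid pre (cs.map (fun _ => ' ')) ' ']
      have h1 : ((pre.length : Int) + 1) = (((pre ++ [PySem.List.pyGetD ks (PySem.Int.mod (n : Int) (ks.length : Int)) ' ']).length : Nat) : Int) := by
        simp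
      have h2 : ((n : Int) + 1) = ((n + 1 : Nat) : Int) := by push_cast; ring
      rw [h1, h2]
      have := ih (n + 1) (pre ++ [PySem.List.pyGetD ks (PySem.Int.mod (n : Int) (ks.length : Int)) ' '])
      simp only [List.append_assoc, List.singleton_append] at this
      rw [this]; simp [pvRef, h]
    · have hmap : (c :: cs).map (fun _ => ' ') = ' ' :: cs.map (fun _ => ' ') := rfl
      simp only [pvPos, h, Bool.false_eq_true, ite_false, hmap]
      have h1 : ((pre.length : Int) + 1) = (((pre ++ [' ']).length : Nat) : Int) := by
        simp
      rw [h1]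
      have := ih n (pre ++ [' '])
      simp only [List.append_assoc, List.singleton_append] at this
      rw [this]; simp [pvRef, h]

-- ===== VERDICT (by name: the statement is the Claim_ definition above) =====
theorem pad_key_spec : Claim_equal_pad_key := by
  intro message key _ _
  unfold Spec_pad_key pad_key pad_key_alt
  dsimp only
  rw [pvB_pos]
  have hA := pvA_loop key.toList message.toList [] 0
  have hB := pvB_fill key.toList message.toList 0 []
  simp only [List.nil_append, List.length_nil, Nat.cast_zero] at hA hB
  rw [hA, hB]
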